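-- pv_equiv track=rewrite | github.com/Fungu/advent_of_code | aoc_2020_python/day24.py | initState
-- ===== SOURCE A (Python) =====
-- import operator
--
-- directions = {
--     "e": [1, -1, 0],
--     "se": [0, -1, 1],
--     "sw": [-1, 0, 1],
--     "w": [-1, 1, 0],
--     "nw": [0, 1, -1],
--     "ne": [1, 0, -1]
-- }
--
-- def initState(inputLines):
--     state = {}
--     for line in inputLines:
--         position = [0, 0, 0]
--         partialDirection = ""
--         for c in line:
--             if c in ["e", "w"]:
--                 direction = directions[partialDirection + c]
--                 position = list(map(operator.add, position, direction))
--                 partialDirection = ""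
--             else:
--                 partialDirection = c
--
--         pos = tuple(position)
--         if pos in state and state[pos]:
--             state[pos] = False
--         else:
--             state[pos] = True
--         initNeighbors(state, pos, directions.values())
--     return state
--
-- def initNeighbors(state, pos, neighbors):
--     for n in neighbors:
--         p = tuple(map(operator.add, n, pos))
--         if p not in state:
--             state[p] = False
-- ===== SOURCE B (Python) =====
-- VEC = {
--     "e": (1, -1, 0),
--     "se": (0, -1, 1),
--     "sw": (-1, 0, 1),
--     "w": (-1, 1, 0),
--     "nw": (0, 1, -1),
--     "ne": (1, 0, -1),
-- }
--
-- def _endpoint(line):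
--     # running sum of direction vectors; the last non-e/w char is the pending prefix
--     x = y = z = 0
--     prev = ""
--     for c in line:
--         if c == "e" or c == "w":
--             dx, dy, dz = VEC[prev + c]
--             x += dx
--             y += dy
--             z += dz
--             prev = ""
--         else:
--             prev = c
--     return (x, y, z)
--
-- def initState(inputLines):
--     # stage 1: parse every line to its endpoint
--     endpoints = [_endpoint(line) for line in inputLines]
--     # stage 2: multiplicity of each endpoint
--     counts = {}
--     for p in endpoints:
--         counts[p] = counts.get(p, 0) + 1
--     # stage 3: one pass over first occurrences; a tile is flipped iff its
--     # visit count is odd, and each distinct tile seeds its six neighbours once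
--     state = {}
--     seen = set()
--     for p in endpoints:
--         if p not in seen:
--             seen.add(p)
--             state[p] = counts[p] % 2 == 1
--             for dx, dy, dz in VEC.values():
--                 q = (p[0] + dx, p[1] + dy, p[2] + dz)
--                 if q not in state:
--                     state[q] = False
--     return state
-- ===== Notes on version B (the rewrite author's own statement) =====
-- stated objective: alternative
-- what changed: B is staged instead of A's single interleaved dict loop: it first parses every line to its endpoint, then builds a multiplicity table, and finally makes one deduplicated pass over first-occurrence endpoints setting each tile to count%2==1 directly (no toggling) and seeding each distinct tile's six neighbours exactly once.
import Mathlib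
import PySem

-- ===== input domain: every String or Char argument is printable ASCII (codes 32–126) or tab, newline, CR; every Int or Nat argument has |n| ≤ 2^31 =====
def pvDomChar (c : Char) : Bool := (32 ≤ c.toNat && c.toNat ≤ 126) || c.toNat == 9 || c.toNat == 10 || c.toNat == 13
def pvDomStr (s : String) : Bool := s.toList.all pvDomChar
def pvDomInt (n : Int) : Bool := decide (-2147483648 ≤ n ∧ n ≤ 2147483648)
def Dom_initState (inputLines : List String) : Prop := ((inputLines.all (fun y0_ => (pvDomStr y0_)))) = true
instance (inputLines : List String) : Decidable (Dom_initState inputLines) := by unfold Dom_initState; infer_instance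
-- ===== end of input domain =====

-- B is staged where A interleaves: B first parses every line to its endpoint, then tallies
-- endpoint multiplicities, then makes one deduplicated pass setting each distinct tile to
-- count%2==1 (no toggling) and seeding its six neighbours once ("alternative"; same cost);
-- A = B is proved on every input where A returns.

-- ===== PORT A =====

-- module-level dict `directions`
def pyDirections : PySem.Dict String (List Int) :=
  PySem.Dict.ofList [("e", [1, -1, 0]), ("se", [0, -1, 1]), ("sw", [-1, 0, 1]),
                     ("w", [-1, 1, 0]), ("nw", [0, 1, -1]), ("ne", [1, 0, -1])]

-- one iteration of A's inner `for c in line` loop; state = (position, partialDirection).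
-- `directions[partialDirection + c]` raises KeyError on a missing key (excluded by Pre_);
-- the port returns the zero vector there to stay total.
def stepA (st : List Int × String) (c : Char) : List Int × String :=
  if c = 'e' ∨ c = 'w' then
    let direction := (pyDirections.get? (st.2.push c)).getD [0, 0, 0]
    (List.zipWith (· + ·) st.1 direction, "")
  else
    (st.1, String.singleton c)

-- helper initNeighbors: `p = tuple(map(operator.add, n, pos)); if p not in state: state[p] = False`
def initNeighborsA (state : PySem.Dict (Int × Int × Int) Bool) (pos : Int × Int × Int) :
    PySem.Dict (Int × Int × Int) Bool :=
  pyDirections.values.foldl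
    (fun st n =>
      let p : Int × Int × Int :=
        match n with
        | [a, b, c] => (a + pos.1, b + pos.2.1, c + pos.2.2)
        | _ => pos        -- unreachable: every value of `directions` has three components
      if st.contains p then st else st.insert p false)
    state

-- body of A's `for line in inputLines` loop
def lineA (state : PySem.Dict (Int × Int × Int) Bool) (line : String) :
    PySem.Dict (Int × Int × Int) Bool :=
  let r := line.toList.foldl stepA ([0, 0, 0], "")
  let pos : Int × Int × Int :=
    match r.1 with
    | [x, y, z] => (x, y, z)   -- tuple(position); position always has three components
    | _ => (0, 0, 0)
  -- `if pos in state and state[pos]: state[pos] = False else: state[pos] = True`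
  let state1 := if state.get? pos = some true then state.insert pos false else state.insert pos true
  initNeighborsA state1 pos

def initState (inputLines : List String) : List (Int × Int × Int × Bool) :=
  ((inputLines.foldl lineA PySem.Dict.empty).items).map (fun p => (p.1.1, p.1.2.1, p.1.2.2, p.2))

-- ===== PORT B =====

-- module-level dict VEC
def pyVEC : PySem.Dict String (Int × Int × Int) :=
  PySem.Dict.ofList [("e", (1, -1, 0)), ("se", (0, -1, 1)), ("sw", (-1, 0, 1)),
                     ("w", (-1, 1, 0)), ("nw", (0, 1, -1)), ("ne", (1, 0, -1))]

-- one iteration of `_endpoint`'s `for c in line` loop; state = ((x, y, z), prev)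
def stepB (st : (Int × Int × Int) × String) (c : Char) : (Int × Int × Int) × String :=
  if c = 'e' ∨ c = 'w' then
    let d := (pyVEC.get? (st.2.push c)).getD (0, 0, 0)   -- KeyError excluded by Pre_
    ((st.1.1 + d.1, st.1.2.1 + d.2.1, st.1.2.2 + d.2.2), "")
  else (st.1, String.singleton c)

-- B's helper `_endpoint`
def endpointB (line : String) : Int × Int × Int :=
  (line.toList.foldl stepB ((0, 0, 0), "")).1

-- stage 2: `counts[p] = counts.get(p, 0) + 1`
def countsB (endpoints : List (Int × Int × Int)) : PySem.Dict (Int × Int × Int) Int :=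
  endpoints.foldl (fun d p => d.insert p (d.getD p 0 + 1)) PySem.Dict.empty

-- stage 3's inner `for dx, dy, dz in VEC.values()` seeding loop
def seedB (st : PySem.Dict (Int × Int × Int) Bool) (p : Int × Int × Int) :
    PySem.Dict (Int × Int × Int) Bool :=
  pyVEC.values.foldl
    (fun s d =>
      let q : Int × Int × Int := (p.1 + d.1, p.2.1 + d.2.1, p.2.2 + d.2.2)
      if s.contains q then s else s.insert q false)
    st

-- body of stage 3's `for p in endpoints` loop; acc = (state, seen)
def bodyB (counts : PySem.Dict (Int × Int × Int) Int)
    (acc : PySem.Dict (Int × Int × Int) Bool × PySem.Set (Int × Int × Int))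
    (p : Int × Int × Int) :
    PySem.Dict (Int × Int × Int) Bool × PySem.Set (Int × Int × Int) :=
  if PySem.Set.contains acc.2 p then acc
  else
    (seedB (acc.1.insert p (PySem.Int.mod (counts.getD p 0) 2 == 1)) p,   -- counts[p]: p is always a key
     PySem.Set.add acc.2 p)

def initState_alt (inputLines : List String) : List (Int × Int × Int × Bool) :=
  let endpoints := inputLines.map endpointB
  let counts := countsB endpoints
  (((endpoints.foldl (bodyB counts) (PySem.Dict.empty, PySem.Set.empty)).1).items).map
    (fun p => (p.1.1, p.1.2.1, p.1.2.2, p.2))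

-- ===== PRECONDITION & SPEC =====

-- Pre_ excludes exactly the inputs on which A raises KeyError: a line with an 'e'/'w' whose
-- preceding character (if any) is not one of 'e','w','n','s'.
def Pre_initState (inputLines : List String) : Prop :=
  ∀ line ∈ inputLines, ∀ pc ∈ ('e' :: line.toList).zip line.toList,
    (pc.2 = 'e' ∨ pc.2 = 'w') → pc.1 ∈ (['e', 'w', 'n', 's'] : List Char)
instance (inputLines : List String) : Decidable (Pre_initState inputLines) := by
  unfold Pre_initState; infer_instance

def pvWitness_initState : List String := ["esenee", "nwwswee", ""]

def Spec_initState (inputLines : List String) (out : List (Int × Int × Int × Bool)) : Prop := out = initState_alt inputLines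
instance (inputLines : List String) (out : List (Int × Int × Int × Bool)) : Decidable (Spec_initState inputLines out) := by unfold Spec_initState; infer_instance

-- ===== CLAIM (what is proved, stated in full; the proofs are below) =====
def Claim_equal_initState : Prop := ∀ (inputLines : List String), Dom_initState inputLines → Pre_initState inputLines → Spec_initState inputLines (initState inputLines)

-- ===== LEMMAS AND PROOFS =====

-- proof-only abbreviations
def pari (n : Nat) : Bool := decide (n % 2 = 1)

-- A's per-line action as a function of the endpoint
def toggleSeedA (state : PySem.Dict (Int × Int × Int) Bool) (pos : Int × Int × Int) :
    PySem.Dict (Int × Int × Int) Bool :=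
  initNeighborsA
    (if state.get? pos = some true then state.insert pos false else state.insert pos true) pos

-- the six neighbour keys of p, in VEC order
def nbrs (p : Int × Int × Int) : List (Int × Int × Int) :=
  pyVEC.values.map (fun d => (p.1 + d.1, p.2.1 + d.2.1, p.2.2 + d.2.2))

-- seed a single key if absent
def condIns (st : PySem.Dict (Int × Int × Int) Bool) (q : Int × Int × Int) :
    PySem.Dict (Int × Int × Int) Bool :=
  if st.contains q then st else st.insert q false

-- value patch: keys in S carry the total parity, others are untouched
def patch (eps S : List (Int × Int × Int)) (kv : (Int × Int × Int) × Bool) :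
    (Int × Int × Int) × Bool :=
  if kv.1 ∈ S then (kv.1, pari (eps.count kv.1)) else kv

lemma pari_succ (n : Nat) : pari (n + 1) = !(pari n) := by
  rcases Nat.mod_two_eq_zero_or_one n with h | h <;>
    simp [pari, Nat.add_mod, h]

-- the two literal direction tables agree (as vectors) on EVERY key, with matching defaults
lemma lookup_corr (s : String) :
    (pyDirections.get? s).getD [0, 0, 0] =
      (fun t : Int × Int × Int => [t.1, t.2.1, t.2.2]) ((pyVEC.get? s).getD (0, 0, 0)) := by
  have h1 : pyDirections = PySem.Dict.mk [("e", [1, -1, 0]), ("se", [0, -1, 1]), ("sw", [-1, 0, 1]),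
                     ("w", [-1, 1, 0]), ("nw", [0, 1, -1]), ("ne", [1, 0, -1])] := by rfl
  have h2 : pyVEC = PySem.Dict.mk [("e", (1, -1, 0)), ("se", (0, -1, 1)), ("sw", (-1, 0, 1)),
                     ("w", (-1, 1, 0)), ("nw", (0, 1, -1)), ("ne", (1, 0, -1))] := by rfl
  rw [h1, h2]
  simp only [PySem.Dict.get?_mk_cons]
  split_ifs <;> rfl

-- A's stateful character scan computes the same endpoint as B's `_endpoint` scan
lemma parse_corr (l : List Char) : ∀ (x y z : Int) (s : String),
    (l.foldl stepA ([x, y, z], s)).1 =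
      (fun t : Int × Int × Int => [t.1, t.2.1, t.2.2]) ((l.foldl stepB ((x, y, z), s)).1) := by
  induction l with
  | nil => intro x y z s; rfl
  | cons c l ih =>
    intro x y z s
    by_cases hc : c = 'e' ∨ c = 'w'
    · simp only [List.foldl_cons, stepA, stepB, hc, if_pos, lookup_corr]
      exact ih _ _ _ _
    · simp only [List.foldl_cons, stepA, stepB, hc, if_false]
      exact ih _ _ _ _

-- A's toggle branch written as a single insert
lemma toggle_corr (d : PySem.Dict (Int × Int × Int) Bool) (pos : Int × Int × Int) :
    (if d.get? pos = some true then d.insert pos false else d.insert pos true) =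
      d.insert pos (!(d.getD pos false)) := by
  rw [PySem.Dict.getD_eq_get?_getD]
  cases h : d.get? pos with
  | none => simp
  | some b => cases b <;> simp

-- A's neighbour pass equals B's (the vector additions commute)
lemma seedA_eq_seedB (st : PySem.Dict (Int × Int × Int) Bool) (p : Int × Int × Int) :
    initNeighborsA st p = seedB st p := by
  rw [initNeighborsA, seedB,
    show pyDirections.values = [[1, -1, 0], [0, -1, 1], [-1, 0, 1],
      [-1, 1, 0], [0, 1, -1], [1, 0, -1]] from rfl,
    show pyVEC.values = [(1, -1, 0), (0, -1, 1), (-1, 0, 1),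
      (-1, 1, 0), (0, 1, -1), (1, 0, -1)] from rfl]
  simp only [List.foldl_cons, List.foldl_nil, Int.add_comm]

-- B's neighbour pass as a fold of `condIns` over the key list
lemma seedB_eq_fold (st : PySem.Dict (Int × Int × Int) Bool) (p : Int × Int × Int) :
    seedB st p = (nbrs p).foldl condIns st := by
  rw [nbrs, List.foldl_map]; rfl

-- A's per-line action, via the endpoint
lemma lineA_eq (d : PySem.Dict (Int × Int × Int) Bool) (line : String) :
    lineA d line = toggleSeedA d (endpointB line) := by
  rw [lineA, toggleSeedA, endpointB, parse_corr]

-- B's inserted value is the total parity of the endpoint's count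
lemma val_eq (eps : List (Int × Int × Int)) (p : Int × Int × Int) :
    (PySem.Int.mod ((countsB eps).getD p 0) 2 == 1) = pari (eps.count p) := by
  rw [countsB, PySem.Dict.getD_foldl_insert_add_one]
  simp only [PySem.Dict.getD_empty, zero_add]
  rw [show ((2 : Int) = ((2 : Nat) : Int)) from rfl, PySem.Int.mod_natCast, pari]
  rcases Nat.mod_two_eq_zero_or_one (eps.count p) with h | h <;> simp [h]

-- `patch` keeps the key
lemma patch_fst (eps S : List (Int × Int × Int)) (kv : (Int × Int × Int) × Bool) :
    (patch eps S kv).1 = kv.1 := by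
  unfold patch; split <;> rfl

-- the patch relation forces equal key lists
lemma keys_eq_of_patch (eps S : List (Int × Int × Int))
    (A B : PySem.Dict (Int × Int × Int) Bool)
    (h : B.items = A.items.map (patch eps S)) : B.keys = A.keys := by
  show B.items.map Prod.fst = A.items.map Prod.fst
  rw [h, List.map_map]
  exact List.map_congr_left (fun kv _ => patch_fst eps S kv)

-- values of A at present / absent keys, from the value invariants
lemma getD_notmem (S : List (Int × Int × Int)) (A : PySem.Dict (Int × Int × Int) Bool)
    (hI2 : ∀ kv ∈ A.items, kv.1 ∉ S → kv.2 = false) (p : Int × Int × Int) (hp : p ∉ S) :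
    A.getD p false = false := by
  cases hc : A.contains p with
  | false => exact PySem.Dict.getD_of_not_contains A false hc
  | true =>
    have hsome : (A.get? p).isSome := by rw [← PySem.Dict.contains_eq_isSome_get?]; exact hc
    obtain ⟨w, hw⟩ := Option.isSome_iff_exists.mp hsome
    have hmem := PySem.Dict.mem_items_of_get?_eq_some A hw
    rw [PySem.Dict.getD_eq_get?_getD, hw]
    exact hI2 _ hmem hp

lemma getD_mem (S : List (Int × Int × Int)) (A : PySem.Dict (Int × Int × Int) Bool)
    (hI5 : ∀ kv ∈ A.items, kv.1 ∈ S → kv.2 = pari (S.count kv.1)) (p : Int × Int × Int)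
    (hp : p ∈ S) (hc : A.contains p = true) : A.getD p false = pari (S.count p) := by
  have hsome : (A.get? p).isSome := by rw [← PySem.Dict.contains_eq_isSome_get?]; exact hc
  obtain ⟨w, hw⟩ := Option.isSome_iff_exists.mp hsome
  have hmem := PySem.Dict.mem_items_of_get?_eq_some A hw
  rw [PySem.Dict.getD_eq_get?_getD, hw]
  exact hI5 _ hmem hp

lemma contains_eq_of_patch (eps S : List (Int × Int × Int))
    (A B : PySem.Dict (Int × Int × Int) Bool)
    (h : B.items = A.items.map (patch eps S)) (q : Int × Int × Int) :
    B.contains q = A.contains q := by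
  rw [PySem.Dict.contains_eq_decide_mem_keys, PySem.Dict.contains_eq_decide_mem_keys,
    keys_eq_of_patch eps S A B h]

-- `condIns` only adds keys
lemma contains_condIns_mono (st : PySem.Dict (Int × Int × Int) Bool)
    (q x : Int × Int × Int) (h : st.contains x = true) : (condIns st q).contains x = true := by
  unfold condIns; split
  · exact h
  · rw [PySem.Dict.contains_insert]; simp [h]

lemma contains_foldl_condIns_mono (qs : List (Int × Int × Int)) :
    ∀ (st : PySem.Dict (Int × Int × Int) Bool) (x : Int × Int × Int),
      st.contains x = true → (qs.foldl condIns st).contains x = true := by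
  induction qs with
  | nil => intro st x h; exact h
  | cons q qs ih => intro st x h; exact ih _ _ (contains_condIns_mono st q x h)

-- seeding is a no-op when all keys are present
lemma foldl_condIns_noop (qs : List (Int × Int × Int)) :
    ∀ (st : PySem.Dict (Int × Int × Int) Bool),
      (∀ q ∈ qs, st.contains q = true) → qs.foldl condIns st = st := by
  induction qs with
  | nil => intro st _; rfl
  | cons q qs ih =>
    intro st h
    have hq : condIns st q = st := by unfold condIns; rw [h q (by simp)]; rfl
    rw [List.foldl_cons, hq]
    exact ih st (fun x hx => h x (by simp [hx]))

-- the invariant preserved by seeding both sides with the same key list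
lemma seed_inv (eps S : List (Int × Int × Int)) (qs : List (Int × Int × Int)) :
    ∀ (A B : PySem.Dict (Int × Int × Int) Bool),
      A.keys.Nodup →
      B.items = A.items.map (patch eps S) →
      (∀ x ∈ S, A.contains x = true) →
      (∀ kv ∈ A.items, kv.1 ∈ S → kv.2 = pari (S.count kv.1)) →
      (∀ kv ∈ A.items, kv.1 ∉ S → kv.2 = false) →
      (qs.foldl condIns A).keys.Nodup ∧
      (qs.foldl condIns B).items = (qs.foldl condIns A).items.map (patch eps S) ∧
      (∀ x ∈ S, (qs.foldl condIns A).contains x = true) ∧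
      (∀ kv ∈ (qs.foldl condIns A).items, kv.1 ∈ S → kv.2 = pari (S.count kv.1)) ∧
      (∀ kv ∈ (qs.foldl condIns A).items, kv.1 ∉ S → kv.2 = false) ∧
      (∀ q ∈ qs, (qs.foldl condIns A).contains q = true) := by
  induction qs with
  | nil =>
    intro A B hnd hI1 hS hI5 hI2
    exact ⟨hnd, hI1, hS, hI5, hI2, by simp⟩
  | cons q qs ih =>
    intro A B hnd hI1 hS hI5 hI2
    have hBA : B.contains q = A.contains q := contains_eq_of_patch eps S A B hI1 q
    by_cases hc : A.contains q = true
    · have hA : condIns A q = A := by unfold condIns; rw [hc]; rfl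
      have hB : condIns B q = B := by unfold condIns; rw [hBA, hc]; rfl
      simp only [List.foldl_cons, hA, hB]
      obtain ⟨c1, c2, c3, c4, c5, c6⟩ := ih A B hnd hI1 hS hI5 hI2
      refine ⟨c1, c2, c3, c4, c5, ?_⟩
      intro x hx
      rcases List.mem_cons.mp hx with rfl | hx
      · exact contains_foldl_condIns_mono qs A x hc
      · exact c6 x hx
    · have hcf : A.contains q = false := by
        cases h' : A.contains q
        · rfl
        · exact absurd h' hc
      have hqS : q ∉ S := fun hmem => hc (hS q hmem)
      have hA : condIns A q = A.insert q false := by unfold condIns; rw [hcf]; rfl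
      have hB : condIns B q = B.insert q false := by unfold condIns; rw [hBA, hcf]; rfl
      simp only [List.foldl_cons, hA, hB]
      have hAitems := PySem.Dict.items_insert_of_not_contains A (k := q) false hcf
      have hBitems := PySem.Dict.items_insert_of_not_contains B (k := q) false (by rw [hBA]; exact hcf)
      have hnd' : (A.insert q false).keys.Nodup := PySem.Dict.nodup_keys_insert A q false hnd
      have hI1' : (B.insert q false).items = (A.insert q false).items.map (patch eps S) := by
        rw [hAitems, hBitems, List.map_append, hI1]
        simp [patch, hqS]
      have hS' : ∀ x ∈ S, (A.insert q false).contains x = true := by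
        intro x hx; rw [PySem.Dict.contains_insert]; simp [hS x hx]
      have hI5' : ∀ kv ∈ (A.insert q false).items, kv.1 ∈ S → kv.2 = pari (S.count kv.1) := by
        rw [hAitems]; intro kv hkv hkS
        rcases List.mem_append.mp hkv with h' | h'
        · exact hI5 kv h' hkS
        · simp only [List.mem_singleton] at h'
          subst h'
          exact absurd hkS hqS
      have hI2' : ∀ kv ∈ (A.insert q false).items, kv.1 ∉ S → kv.2 = false := by
        rw [hAitems]; intro kv hkv hkS
        rcases List.mem_append.mp hkv with h' | h'
        · exact hI2 kv h' hkS
        · simp only [List.mem_singleton] at h'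
          subst h'
          rfl
      obtain ⟨c1, c2, c3, c4, c5, c6⟩ := ih _ _ hnd' hI1' hS' hI5' hI2'
      refine ⟨c1, c2, c3, c4, c5, ?_⟩
      intro x hx
      rcases List.mem_cons.mp hx with rfl | hx
      · exact contains_foldl_condIns_mono qs _ x
          (by rw [PySem.Dict.contains_insert]; simp)
      · exact c6 x hx

-- membership / counts in S ++ [p], for keys other than p
lemma count_append_ne (S : List (Int × Int × Int)) (p k : Int × Int × Int) (hk : k ≠ p) :
    (S ++ [p]).count k = S.count k := by
  have h0 : List.count k [p] = 0 := List.count_eq_zero.mpr (by simp [hk])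
  rw [List.count_append, h0, Nat.add_zero]

lemma mem_append_ne (S : List (Int × Int × Int)) (p k : Int × Int × Int) (hk : k ≠ p) :
    k ∈ S ++ [p] ↔ k ∈ S := by simp [hk]

-- the invariant after inserting a FRESH endpoint on both sides (value true vs total parity)
lemma insert_inv (eps S : List (Int × Int × Int)) (p : Int × Int × Int)
    (A B : PySem.Dict (Int × Int × Int) Bool)
    (hI1 : B.items = A.items.map (patch eps S))
    (hI5 : ∀ kv ∈ A.items, kv.1 ∈ S → kv.2 = pari (S.count kv.1))
    (hI2 : ∀ kv ∈ A.items, kv.1 ∉ S → kv.2 = false)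
    (hp : p ∉ S) :
    (B.insert p (pari (eps.count p))).items
      = (A.insert p true).items.map (patch eps (S ++ [p])) ∧
    (∀ kv ∈ (A.insert p true).items, kv.1 ∈ S ++ [p] → kv.2 = pari ((S ++ [p]).count kv.1)) ∧
    (∀ kv ∈ (A.insert p true).items, kv.1 ∉ S ++ [p] → kv.2 = false) := by
  have hBA : B.contains p = A.contains p := contains_eq_of_patch eps S A B hI1 p
  have hc1 : (S ++ [p]).count p = 1 := by
    rw [List.count_append, List.count_eq_zero.mpr hp]; simp
  by_cases hc : A.contains p = true
  · rw [PySem.Dict.items_insert_of_contains A true hc,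
      PySem.Dict.items_insert_of_contains B (pari (eps.count p)) (by rw [hBA]; exact hc),
      hI1, List.map_map, List.map_map]
    refine ⟨List.map_congr_left ?_, ?_, ?_⟩
    · intro kv _
      by_cases hk : kv.1 = p
      · simp [patch, Function.comp, hk, hp]
      · have h1 : (patch eps S kv).1 = kv.1 := patch_fst eps S kv
        simp only [Function.comp]
        rw [if_neg (by simp [h1, hk]), if_neg (by simp [hk])]
        simp [patch, mem_append_ne S p kv.1 hk]
    · intro kv hkv hkS
      obtain ⟨kv₀, hkv₀, hkv'⟩ := List.mem_map.mp hkv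
      by_cases hk : kv₀.1 = p
      · rw [if_pos (by exact beq_iff_eq.mpr hk)] at hkv'
        subst hkv'
        rw [hc1]; rfl
      · rw [if_neg (by simpa using hk)] at hkv'
        subst hkv'
        rw [count_append_ne S p kv₀.1 hk]
        exact hI5 kv₀ hkv₀ ((mem_append_ne S p kv₀.1 hk).mp hkS)
    · intro kv hkv hkS
      obtain ⟨kv₀, hkv₀, hkv'⟩ := List.mem_map.mp hkv
      by_cases hk : kv₀.1 = p
      · rw [if_pos (by exact beq_iff_eq.mpr hk)] at hkv'
        subst hkv'
        exact absurd (by simp) hkS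
      · rw [if_neg (by simpa using hk)] at hkv'
        subst hkv'
        exact hI2 kv₀ hkv₀ (fun hm => hkS ((mem_append_ne S p kv₀.1 hk).mpr hm))
  · have hcf : A.contains p = false := by
      cases h' : A.contains p
      · rfl
      · exact absurd h' hc
    have hAkeys : p ∉ A.keys := by
      intro hm
      rw [PySem.Dict.contains_eq_decide_mem_keys] at hcf
      simp [hm] at hcf
    rw [PySem.Dict.items_insert_of_not_contains A (k := p) true hcf,
      PySem.Dict.items_insert_of_not_contains B (k := p) (pari (eps.count p)) (by rw [hBA]; exact hcf),
      hI1, List.map_append]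
    refine ⟨?_, ?_, ?_⟩
    · congr 1
      · exact List.map_congr_left (fun kv hkv => by
          have hk : kv.1 ≠ p := fun he => hAkeys (he ▸ List.mem_map_of_mem hkv)
          simp [patch, mem_append_ne S p kv.1 hk])
      · simp [patch]
    · intro kv hkv hkS
      rcases List.mem_append.mp hkv with h' | h'
      · have hk : kv.1 ≠ p := fun he => hAkeys (he ▸ PySem.Dict.mem_keys_of_mem_items A h')
        rw [count_append_ne S p kv.1 hk]
        exact hI5 kv h' ((mem_append_ne S p kv.1 hk).mp hkS)
      · simp only [List.mem_singleton] at h'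
        subst h'
        rw [hc1]; rfl
    · intro kv hkv hkS
      rcases List.mem_append.mp hkv with h' | h'
      · have hk : kv.1 ≠ p := fun he => hAkeys (he ▸ List.mem_map_of_mem h')
        exact hI2 kv h' (fun hm => hkS ((mem_append_ne S p kv.1 hk).mpr hm))
      · simp only [List.mem_singleton] at h'
        subst h'
        exact absurd (by simp) hkS

-- the invariant after A toggles an ALREADY-SEEN endpoint in place (B's state is untouched)
lemma insert_inv_mem (eps S : List (Int × Int × Int)) (p : Int × Int × Int)
    (A B : PySem.Dict (Int × Int × Int) Bool)
    (hI1 : B.items = A.items.map (patch eps S))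
    (hI5 : ∀ kv ∈ A.items, kv.1 ∈ S → kv.2 = pari (S.count kv.1))
    (hI2 : ∀ kv ∈ A.items, kv.1 ∉ S → kv.2 = false)
    (hp : p ∈ S) (hc : A.contains p = true) :
    B.items = (A.insert p (pari ((S ++ [p]).count p))).items.map (patch eps (S ++ [p])) ∧
    (∀ kv ∈ (A.insert p (pari ((S ++ [p]).count p))).items, kv.1 ∈ S ++ [p] →
      kv.2 = pari ((S ++ [p]).count kv.1)) ∧
    (∀ kv ∈ (A.insert p (pari ((S ++ [p]).count p))).items, kv.1 ∉ S ++ [p] → kv.2 = false) := by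
  rw [PySem.Dict.items_insert_of_contains A (pari ((S ++ [p]).count p)) hc, hI1, List.map_map]
  refine ⟨List.map_congr_left ?_, ?_, ?_⟩
  · intro kv _
    by_cases hk : kv.1 = p
    · simp only [Function.comp]
      rw [if_pos (by simp [hk])]
      simp [patch, hk, hp]
    · simp only [Function.comp]
      rw [if_neg (by simp [hk])]
      simp [patch, mem_append_ne S p kv.1 hk]
  · intro kv hkv hkS
    obtain ⟨kv₀, hkv₀, hkv'⟩ := List.mem_map.mp hkv
    by_cases hk : kv₀.1 = p
    · rw [if_pos (by exact beq_iff_eq.mpr hk)] at hkv'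
      subst hkv'
      rfl
    · rw [if_neg (by simpa using hk)] at hkv'
      subst hkv'
      rw [count_append_ne S p kv₀.1 hk]
      exact hI5 kv₀ hkv₀ ((mem_append_ne S p kv₀.1 hk).mp hkS)
  · intro kv hkv hkS
    obtain ⟨kv₀, hkv₀, hkv'⟩ := List.mem_map.mp hkv
    by_cases hk : kv₀.1 = p
    · rw [if_pos (by exact beq_iff_eq.mpr hk)] at hkv'
      subst hkv'
      exact absurd (by simp) hkS
    · rw [if_neg (by simpa using hk)] at hkv'
      subst hkv'
      exact hI2 kv₀ hkv₀ (fun hm => hkS ((mem_append_ne S p kv₀.1 hk).mpr hm))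

-- main simulation: from any matching mid-states, the remaining endpoints drive A's
-- toggle-and-seed loop and B's deduplicated pass to patch-matching final states
lemma main_inv (eps : List (Int × Int × Int)) :
    ∀ (suf pre : List (Int × Int × Int)) (Ast Bst : PySem.Dict (Int × Int × Int) Bool)
      (seen : PySem.Set (Int × Int × Int)),
      eps = pre ++ suf →
      seen = PySem.Set.ofList pre →
      Ast.keys.Nodup →
      Bst.items = Ast.items.map (patch eps pre) →
      (∀ kv ∈ Ast.items, kv.1 ∈ pre → kv.2 = pari (pre.count kv.1)) →
      (∀ kv ∈ Ast.items, kv.1 ∉ pre → kv.2 = false) →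
      (∀ p ∈ pre, Ast.contains p = true ∧ ∀ q ∈ nbrs p, Ast.contains q = true) →
      ((suf.foldl (bodyB (countsB eps)) (Bst, seen)).1).items
          = (suf.foldl toggleSeedA Ast).items.map (patch eps eps) ∧
        (∀ kv ∈ (suf.foldl toggleSeedA Ast).items, kv.1 ∈ eps →
          kv.2 = pari (eps.count kv.1)) := by
  intro suf
  induction suf with
  | nil =>
    intro pre Ast Bst seen heps hseen hnd hI1 hI5 hI2 hI3
    rw [List.append_nil] at heps
    subst heps
    exact ⟨hI1, hI5⟩
  | cons p rest ih =>
    intro pre Ast Bst seen heps hseen hnd hI1 hI5 hI2 hI3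
    simp only [List.foldl_cons]
    have heps' : eps = (pre ++ [p]) ++ rest := by rw [heps, List.append_assoc]; rfl
    by_cases hp : p ∈ pre
    · -- repeated endpoint: B skips it, A toggles in place and its seeding is a no-op
      have hsc : PySem.Set.contains seen p = true := by
        rw [hseen]
        exact List.contains_iff_mem.mpr ((PySem.Set.mem_ofList pre p).mpr hp)
      have hB : bodyB (countsB eps) (Bst, seen) p = (Bst, seen) := by
        simp only [bodyB]
        rw [if_pos hsc]
      have hcA : Ast.contains p = true := (hI3 p hp).1
      have hval : Ast.getD p false = pari (pre.count p) := getD_mem pre Ast hI5 p hp hcA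
      have hA : toggleSeedA Ast p = Ast.insert p (pari ((pre ++ [p]).count p)) := by
        rw [toggleSeedA, toggle_corr, seedA_eq_seedB, seedB_eq_fold,
          foldl_condIns_noop _ _ (by
            intro q hq
            rw [PySem.Dict.contains_insert]
            simp [(hI3 p hp).2 q hq]),
          hval, ← pari_succ]
        congr 2
        rw [List.count_append]
        simp
      rw [hB, hA]
      obtain ⟨j1, j5, j2⟩ := insert_inv_mem eps pre p Ast Bst hI1 hI5 hI2 hp hcA
      have hadd : (PySem.Set.ofList pre).add p = PySem.Set.ofList pre := by
        have hc : (PySem.Set.ofList pre).contains p = true :=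
          List.contains_iff_mem.mpr ((PySem.Set.mem_ofList pre p).mpr hp)
        unfold PySem.Set.add
        rw [hc]
        rfl
      refine ih (pre ++ [p]) _ Bst seen heps' ?_ ?_ j1 j5 j2 ?_
      · rw [PySem.Set.ofList_append, PySem.Set.update_cons, PySem.Set.update_nil, hadd, hseen]
      · exact PySem.Dict.nodup_keys_insert Ast p _ hnd
      · intro x hx
        have hx' : x ∈ pre := by
          rcases List.mem_append.mp hx with h' | h'
          · exact h'
          · simp only [List.mem_singleton] at h'; exact h' ▸ hp
        refine ⟨?_, ?_⟩
        · rw [PySem.Dict.contains_insert]; simp [(hI3 x hx').1]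
        · intro q hq
          rw [PySem.Dict.contains_insert]; simp [(hI3 x hx').2 q hq]
    · -- fresh endpoint: A toggles a false/absent key to True, B writes the total parity;
      -- both then seed the six neighbours
      have hsc : PySem.Set.contains seen p = false := by
        rw [hseen]
        exact Bool.eq_false_iff.mpr
          (fun h => hp ((PySem.Set.mem_ofList pre p).mp (List.contains_iff_mem.mp h)))
      have hB : bodyB (countsB eps) (Bst, seen) p
          = (seedB (Bst.insert p (pari (eps.count p))) p, seen.add p) := by
        simp only [bodyB]
        rw [if_neg (by rw [hsc]; simp), val_eq]
      have hA : toggleSeedA Ast p = (nbrs p).foldl condIns (Ast.insert p true) := by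
        rw [toggleSeedA, toggle_corr, getD_notmem pre Ast hI2 p hp, seedA_eq_seedB,
          seedB_eq_fold]
        rfl
      rw [hB, hA]
      obtain ⟨j1, j5, j2⟩ := insert_inv eps pre p Ast Bst hI1 hI5 hI2 hp
      have hS' : ∀ x ∈ pre ++ [p], (Ast.insert p true).contains x = true := by
        intro x hx
        rw [PySem.Dict.contains_insert]
        rcases List.mem_append.mp hx with h' | h'
        · simp [(hI3 x h').1]
        · simp only [List.mem_singleton] at h'; simp [h']
      obtain ⟨c1, c2, c3, c4, c5, c6⟩ := seed_inv eps (pre ++ [p]) (nbrs p)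
        (Ast.insert p true) (Bst.insert p (pari (eps.count p)))
        (PySem.Dict.nodup_keys_insert Ast p true hnd) j1 hS' j5 j2
      rw [seedB_eq_fold]
      refine ih (pre ++ [p]) _ _ (seen.add p) heps' ?_ c1 c2 c4 c5 ?_
      · rw [PySem.Set.ofList_append, PySem.Set.update_cons, PySem.Set.update_nil, hseen]
      · intro x hx
        refine ⟨c3 x hx, ?_⟩
        intro q hq
        rcases List.mem_append.mp hx with h' | h'
        · exact contains_foldl_condIns_mono (nbrs p) _ q
            (by rw [PySem.Dict.contains_insert]; simp [(hI3 x h').2 q hq])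
        · simp only [List.mem_singleton] at h'
          subst h'
          exact c6 q hq

-- A's whole loop, via the endpoints
lemma foldA_eq (inputLines : List String) :
    ∀ d, inputLines.foldl lineA d = (inputLines.map endpointB).foldl toggleSeedA d := by
  induction inputLines with
  | nil => intro d; rfl
  | cons l ls ih =>
    intro d
    simp only [List.foldl_cons, List.map_cons, lineA_eq]
    exact ih _

-- ===== VERDICT (by name: the statement is the Claim_ definition above) =====
theorem initState_spec : Claim_equal_initState := by
  intro inputLines _ _
  unfold Spec_initState initState initState_alt
  obtain ⟨h1, h2⟩ := main_inv (inputLines.map endpointB) (inputLines.map endpointB) []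
    PySem.Dict.empty PySem.Dict.empty PySem.Set.empty (by simp) rfl
    PySem.Dict.nodup_keys_empty rfl
    (by intro kv hkv; exact (List.not_mem_nil hkv).elim)
    (by intro kv hkv; exact (List.not_mem_nil hkv).elim)
    (by intro p hp; exact (List.not_mem_nil hp).elim)
  have hid : ((inputLines.map endpointB).foldl toggleSeedA PySem.Dict.empty).items.map
        (patch (inputLines.map endpointB) (inputLines.map endpointB))
      = ((inputLines.map endpointB).foldl toggleSeedA PySem.Dict.empty).items.map id :=
    List.map_congr_left (fun kv hkv => by
      unfold patch
      split
      next hmem => rw [← h2 kv hkv hmem]; rfl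
      next => rfl)
  rw [foldA_eq inputLines PySem.Dict.empty]
  show ((inputLines.map endpointB).foldl toggleSeedA PySem.Dict.empty).items.map _
      = (((inputLines.map endpointB).foldl (bodyB (countsB (inputLines.map endpointB)))
          (PySem.Dict.empty, PySem.Set.empty)).1).items.map _
  rw [h1, hid, List.map_id]
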